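-- pv_equiv track=rewrite | github.com/Kavya2004/Intellens | backend/utils/workflow_diagram_builder.py | get_service_logo
-- ===== SOURCE A (Python) =====
-- def get_service_logo(service):
--     """Get specific logo URL for each service/technology."""
--     service_lower = service.lower()
--
--     # AWS Services with working logos
--     aws_service_icons = {
--         'lambda': 'https://cdn.jsdelivr.net/gh/simple-icons/simple-icons/icons/awslambda.svg',
--         's3': 'https://cdn.jsdelivr.net/gh/simple-icons/simple-icons/icons/amazons3.svg',
--         'ec2': 'https://cdn.jsdelivr.net/gh/simple-icons/simple-icons/icons/amazonec2.svg',
--         'rds': 'https://cdn.jsdelivr.net/gh/simple-icons/simple-icons/icons/amazonrds.svg',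
--         'dynamodb': 'https://cdn.jsdelivr.net/gh/simple-icons/simple-icons/icons/amazondynamodb.svg',
--         'iot': 'https://cdn.jsdelivr.net/gh/simple-icons/simple-icons/icons/amazonwebservices.svg',
--         'kinesis': 'https://cdn.jsdelivr.net/gh/simple-icons/simple-icons/icons/amazonwebservices.svg',
--         'sqs': 'https://cdn.jsdelivr.net/gh/simple-icons/simple-icons/icons/amazonwebservices.svg',
--         'sns': 'https://cdn.jsdelivr.net/gh/simple-icons/simple-icons/icons/amazonwebservices.svg',
--         'cloudformation': 'https://cdn.jsdelivr.net/gh/simple-icons/simple-icons/icons/amazonwebservices.svg',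
--         'cloudwatch': 'https://cdn.jsdelivr.net/gh/simple-icons/simple-icons/icons/amazonwebservices.svg',
--         'apigateway': 'https://cdn.jsdelivr.net/gh/simple-icons/simple-icons/icons/amazonwebservices.svg',
--         'ecs': 'https://cdn.jsdelivr.net/gh/simple-icons/simple-icons/icons/amazonwebservices.svg',
--         'eks': 'https://cdn.jsdelivr.net/gh/simple-icons/simple-icons/icons/amazonwebservices.svg'
--     }
--
--     # Check for specific AWS services first
--     for aws_service, icon_url in aws_service_icons.items():
--         if aws_service in service_lower:
--             return icon_url
--
--     # Generic AWS services
--     if "aws" in service_lower: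
--         return "https://cdn.jsdelivr.net/gh/simple-icons/simple-icons/icons/amazonwebservices.svg"
--
--     # Microsoft Azure
--     elif "azure" in service_lower or "microsoft azure" in service_lower:
--         return "https://upload.wikimedia.org/wikipedia/commons/f/fa/Microsoft_Azure.svg"
--
--     # Google Cloud Platform
--     elif "google cloud" in service_lower or "gcp" in service_lower:
--         return "https://upload.wikimedia.org/wikipedia/commons/5/51/Google_Cloud_logo.svg"
--
--     # Other cloud services
--     elif "docker" in service_lower:
--         return "https://cdn.jsdelivr.net/gh/devicons/devicon/icons/docker/docker-original.svg"
--     elif "kubernetes" in service_lower: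
--         return "https://cdn.jsdelivr.net/gh/devicons/devicon/icons/kubernetes/kubernetes-plain.svg"
--     elif "terraform" in service_lower:
--         return "https://cdn.jsdelivr.net/gh/devicons/devicon/icons/terraform/terraform-original.svg"
--
--     # Databases
--     elif "postgres" in service_lower:
--         return "https://cdn.jsdelivr.net/gh/devicons/devicon/icons/postgresql/postgresql-original.svg"
--     elif "mysql" in service_lower:
--         return "https://cdn.jsdelivr.net/gh/devicons/devicon/icons/mysql/mysql-original.svg"
--     elif "mongodb" in service_lower:
--         return "https://cdn.jsdelivr.net/gh/devicons/devicon/icons/mongodb/mongodb-original.svg"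
--     elif "redis" in service_lower:
--         return "https://cdn.jsdelivr.net/gh/devicons/devicon/icons/redis/redis-original.svg"
--
--     # Web servers
--     elif "nginx" in service_lower:
--         return "https://cdn.jsdelivr.net/gh/devicons/devicon/icons/nginx/nginx-original.svg"
--     elif "apache" in service_lower:
--         return "https://cdn.jsdelivr.net/gh/devicons/devicon/icons/apache/apache-original.svg"
--
--     else:
--         return "https://cdn.jsdelivr.net/gh/devicons/devicon/icons/devicon/devicon-original.svg"
-- ===== SOURCE B (Python) =====
-- # Different algorithm: instead of testing each pattern with a substring search over the
-- # whole string (A's dict loop + elif ladder), B slides over the positions of the lowered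
-- # string once and, at each position, prefix-matches the pattern table, keeping the running
-- # minimum priority index; the answer is the best-priority pattern that occurs anywhere.
-- _AWS = 'https://cdn.jsdelivr.net/gh/simple-icons/simple-icons/icons/amazonwebservices.svg'
--
-- _TABLE = [
--     ('lambda', 'https://cdn.jsdelivr.net/gh/simple-icons/simple-icons/icons/awslambda.svg'),
--     ('s3', 'https://cdn.jsdelivr.net/gh/simple-icons/simple-icons/icons/amazons3.svg'),
--     ('ec2', 'https://cdn.jsdelivr.net/gh/simple-icons/simple-icons/icons/amazonec2.svg'),
--     ('rds', 'https://cdn.jsdelivr.net/gh/simple-icons/simple-icons/icons/amazonrds.svg'),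
--     ('dynamodb', 'https://cdn.jsdelivr.net/gh/simple-icons/simple-icons/icons/amazondynamodb.svg'),
--     ('iot', _AWS), ('kinesis', _AWS), ('sqs', _AWS), ('sns', _AWS),
--     ('cloudformation', _AWS), ('cloudwatch', _AWS), ('apigateway', _AWS),
--     ('ecs', _AWS), ('eks', _AWS), ('aws', _AWS),
--     ('azure', 'https://upload.wikimedia.org/wikipedia/commons/f/fa/Microsoft_Azure.svg'),
--     ('google cloud', 'https://upload.wikimedia.org/wikipedia/commons/5/51/Google_Cloud_logo.svg'),
--     ('gcp', 'https://upload.wikimedia.org/wikipedia/commons/5/51/Google_Cloud_logo.svg'),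
--     ('docker', 'https://cdn.jsdelivr.net/gh/devicons/devicon/icons/docker/docker-original.svg'),
--     ('kubernetes', 'https://cdn.jsdelivr.net/gh/devicons/devicon/icons/kubernetes/kubernetes-plain.svg'),
--     ('terraform', 'https://cdn.jsdelivr.net/gh/devicons/devicon/icons/terraform/terraform-original.svg'),
--     ('postgres', 'https://cdn.jsdelivr.net/gh/devicons/devicon/icons/postgresql/postgresql-original.svg'),
--     ('mysql', 'https://cdn.jsdelivr.net/gh/devicons/devicon/icons/mysql/mysql-original.svg'),
--     ('mongodb', 'https://cdn.jsdelivr.net/gh/devicons/devicon/icons/mongodb/mongodb-original.svg'),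
--     ('redis', 'https://cdn.jsdelivr.net/gh/devicons/devicon/icons/redis/redis-original.svg'),
--     ('nginx', 'https://cdn.jsdelivr.net/gh/devicons/devicon/icons/nginx/nginx-original.svg'),
--     ('apache', 'https://cdn.jsdelivr.net/gh/devicons/devicon/icons/apache/apache-original.svg'),
-- ]
-- _DEFAULT = 'https://cdn.jsdelivr.net/gh/devicons/devicon/icons/devicon/devicon-original.svg'
--
-- def get_service_logo(service):
--     """Get specific logo URL for each service/technology."""
--     sl = service.lower()
--     best = len(_TABLE)
--     for start in range(len(sl) + 1):
--         tail = sl[start:]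
--         for j in range(best):
--             if tail.startswith(_TABLE[j][0]):
--                 best = j
--                 break
--     return _TABLE[best][1] if best < len(_TABLE) else _DEFAULT
-- ===== Notes on version B (the rewrite author's own statement) =====
-- stated objective: alternative
-- what changed: A tests each pattern in priority order with a whole-string substring search (dict loop + elif ladder); B instead slides once over the positions of the lowered string, prefix-matching the pattern table at each position and keeping a running minimum priority index, returning the best-priority pattern that occurs anywhere (default if none).
import Mathlib
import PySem

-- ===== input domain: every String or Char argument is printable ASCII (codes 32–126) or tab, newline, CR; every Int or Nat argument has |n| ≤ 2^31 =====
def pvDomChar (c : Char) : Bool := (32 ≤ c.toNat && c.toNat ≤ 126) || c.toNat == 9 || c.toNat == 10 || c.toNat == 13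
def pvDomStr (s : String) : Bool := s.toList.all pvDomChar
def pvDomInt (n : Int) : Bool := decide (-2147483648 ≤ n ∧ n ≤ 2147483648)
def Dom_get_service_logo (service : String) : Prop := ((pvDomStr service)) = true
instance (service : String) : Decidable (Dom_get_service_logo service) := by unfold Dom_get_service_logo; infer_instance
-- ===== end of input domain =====

-- B replaces A's per-pattern substring ladder by a single left-to-right sweep over the
-- positions of the lowered string, prefix-matching the pattern table at each position and
-- keeping a running minimum priority index; objective: alternative algorithm, same cost.

-- ===== PORT A =====
def awsUrl : String := "https://cdn.jsdelivr.net/gh/simple-icons/simple-icons/icons/amazonwebservices.svg"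

def aws_service_icons : List (String × String) :=
  [("lambda", "https://cdn.jsdelivr.net/gh/simple-icons/simple-icons/icons/awslambda.svg"),
   ("s3", "https://cdn.jsdelivr.net/gh/simple-icons/simple-icons/icons/amazons3.svg"),
   ("ec2", "https://cdn.jsdelivr.net/gh/simple-icons/simple-icons/icons/amazonec2.svg"),
   ("rds", "https://cdn.jsdelivr.net/gh/simple-icons/simple-icons/icons/amazonrds.svg"),
   ("dynamodb", "https://cdn.jsdelivr.net/gh/simple-icons/simple-icons/icons/amazondynamodb.svg"),
   ("iot", awsUrl), ("kinesis", awsUrl), ("sqs", awsUrl), ("sns", awsUrl),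
   ("cloudformation", awsUrl), ("cloudwatch", awsUrl), ("apigateway", awsUrl),
   ("ecs", awsUrl), ("eks", awsUrl)]

-- the 'for aws_service, icon_url in aws_service_icons.items(): if aws_service in service_lower: return icon_url' loop
def awsLoop (sl : String) : List (String × String) → Option String
  | [] => none
  | (k, u) :: rest => if PySem.Str.isIn k sl then some u else awsLoop sl rest

def get_service_logo (service : String) : String :=
  let sl := PySem.Str.lower service
  match awsLoop sl aws_service_icons with
  | some u => u
  | none =>
    if PySem.Str.isIn "aws" sl then awsUrl
    else if PySem.Str.isIn "azure" sl || PySem.Str.isIn "microsoft azure" sl then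
      "https://upload.wikimedia.org/wikipedia/commons/f/fa/Microsoft_Azure.svg"
    else if PySem.Str.isIn "google cloud" sl || PySem.Str.isIn "gcp" sl then
      "https://upload.wikimedia.org/wikipedia/commons/5/51/Google_Cloud_logo.svg"
    else if PySem.Str.isIn "docker" sl then
      "https://cdn.jsdelivr.net/gh/devicons/devicon/icons/docker/docker-original.svg"
    else if PySem.Str.isIn "kubernetes" sl then
      "https://cdn.jsdelivr.net/gh/devicons/devicon/icons/kubernetes/kubernetes-plain.svg"
    else if PySem.Str.isIn "terraform" sl then
      "https://cdn.jsdelivr.net/gh/devicons/devicon/icons/terraform/terraform-original.svg"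
    else if PySem.Str.isIn "postgres" sl then
      "https://cdn.jsdelivr.net/gh/devicons/devicon/icons/postgresql/postgresql-original.svg"
    else if PySem.Str.isIn "mysql" sl then
      "https://cdn.jsdelivr.net/gh/devicons/devicon/icons/mysql/mysql-original.svg"
    else if PySem.Str.isIn "mongodb" sl then
      "https://cdn.jsdelivr.net/gh/devicons/devicon/icons/mongodb/mongodb-original.svg"
    else if PySem.Str.isIn "redis" sl then
      "https://cdn.jsdelivr.net/gh/devicons/devicon/icons/redis/redis-original.svg"
    else if PySem.Str.isIn "nginx" sl then
      "https://cdn.jsdelivr.net/gh/devicons/devicon/icons/nginx/nginx-original.svg"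
    else if PySem.Str.isIn "apache" sl then
      "https://cdn.jsdelivr.net/gh/devicons/devicon/icons/apache/apache-original.svg"
    else "https://cdn.jsdelivr.net/gh/devicons/devicon/icons/devicon/devicon-original.svg"

-- ===== PORT B =====
def logoTable : List (String × String) :=
  [("lambda", "https://cdn.jsdelivr.net/gh/simple-icons/simple-icons/icons/awslambda.svg"),
   ("s3", "https://cdn.jsdelivr.net/gh/simple-icons/simple-icons/icons/amazons3.svg"),
   ("ec2", "https://cdn.jsdelivr.net/gh/simple-icons/simple-icons/icons/amazonec2.svg"),
   ("rds", "https://cdn.jsdelivr.net/gh/simple-icons/simple-icons/icons/amazonrds.svg"),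
   ("dynamodb", "https://cdn.jsdelivr.net/gh/simple-icons/simple-icons/icons/amazondynamodb.svg"),
   ("iot", "https://cdn.jsdelivr.net/gh/simple-icons/simple-icons/icons/amazonwebservices.svg"),
   ("kinesis", "https://cdn.jsdelivr.net/gh/simple-icons/simple-icons/icons/amazonwebservices.svg"),
   ("sqs", "https://cdn.jsdelivr.net/gh/simple-icons/simple-icons/icons/amazonwebservices.svg"),
   ("sns", "https://cdn.jsdelivr.net/gh/simple-icons/simple-icons/icons/amazonwebservices.svg"),
   ("cloudformation", "https://cdn.jsdelivr.net/gh/simple-icons/simple-icons/icons/amazonwebservices.svg"),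
   ("cloudwatch", "https://cdn.jsdelivr.net/gh/simple-icons/simple-icons/icons/amazonwebservices.svg"),
   ("apigateway", "https://cdn.jsdelivr.net/gh/simple-icons/simple-icons/icons/amazonwebservices.svg"),
   ("ecs", "https://cdn.jsdelivr.net/gh/simple-icons/simple-icons/icons/amazonwebservices.svg"),
   ("eks", "https://cdn.jsdelivr.net/gh/simple-icons/simple-icons/icons/amazonwebservices.svg"),
   ("aws", "https://cdn.jsdelivr.net/gh/simple-icons/simple-icons/icons/amazonwebservices.svg"),
   ("azure", "https://upload.wikimedia.org/wikipedia/commons/f/fa/Microsoft_Azure.svg"),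
   ("google cloud", "https://upload.wikimedia.org/wikipedia/commons/5/51/Google_Cloud_logo.svg"),
   ("gcp", "https://upload.wikimedia.org/wikipedia/commons/5/51/Google_Cloud_logo.svg"),
   ("docker", "https://cdn.jsdelivr.net/gh/devicons/devicon/icons/docker/docker-original.svg"),
   ("kubernetes", "https://cdn.jsdelivr.net/gh/devicons/devicon/icons/kubernetes/kubernetes-plain.svg"),
   ("terraform", "https://cdn.jsdelivr.net/gh/devicons/devicon/icons/terraform/terraform-original.svg"),
   ("postgres", "https://cdn.jsdelivr.net/gh/devicons/devicon/icons/postgresql/postgresql-original.svg"),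
   ("mysql", "https://cdn.jsdelivr.net/gh/devicons/devicon/icons/mysql/mysql-original.svg"),
   ("mongodb", "https://cdn.jsdelivr.net/gh/devicons/devicon/icons/mongodb/mongodb-original.svg"),
   ("redis", "https://cdn.jsdelivr.net/gh/devicons/devicon/icons/redis/redis-original.svg"),
   ("nginx", "https://cdn.jsdelivr.net/gh/devicons/devicon/icons/nginx/nginx-original.svg"),
   ("apache", "https://cdn.jsdelivr.net/gh/devicons/devicon/icons/apache/apache-original.svg")]

def defaultUrl : String := "https://cdn.jsdelivr.net/gh/devicons/devicon/icons/devicon/devicon-original.svg"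

-- 'tail.startswith(_TABLE[j][0])' (the none branch mirrors the unreachable out-of-range index)
def hitB (tail : List Char) (j : Nat) : Bool :=
  match logoTable[j]? with
  | some p => PySem.Chars.startswith tail p.1.toList
  | none => false

-- the 'for j in range(best): if tail.startswith(...): best = j; break' inner loop
def innerLoop (tail : List Char) (best j : Nat) : Nat :=
  if j < best then
    if hitB tail j then j else innerLoop tail best (j + 1)
  else best
termination_by best - j

-- the 'for start in range(len(sl) + 1)' sweep keeping the running minimum priority index
def get_service_logo_alt (service : String) : String :=
  let sl := (PySem.Str.lower service).toList
  let best := (List.range (sl.length + 1)).foldl (fun b start => innerLoop (sl.drop start) b 0) logoTable.length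
  if best < logoTable.length then ((logoTable[best]?).map Prod.snd).getD defaultUrl
  else defaultUrl

-- ===== PRECONDITION & SPEC =====
def Spec_get_service_logo (service : String) (out : String) : Prop := out = get_service_logo_alt service
instance (service : String) (out : String) : Decidable (Spec_get_service_logo service out) := by unfold Spec_get_service_logo; infer_instance

-- ===== CLAIM (what is proved, stated in full; the proofs are below) =====
def Claim_equal_get_service_logo : Prop := ∀ (service : String), Dom_get_service_logo service → Spec_get_service_logo service (get_service_logo service)

-- ===== LEMMAS AND PROOFS =====

-- the tail of B's table, after the 14 AWS entries (logoTable = aws_service_icons ++ restTable by rfl)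
def restTable : List (String × String) :=
  [("aws", "https://cdn.jsdelivr.net/gh/simple-icons/simple-icons/icons/amazonwebservices.svg"),
   ("azure", "https://upload.wikimedia.org/wikipedia/commons/f/fa/Microsoft_Azure.svg"),
   ("google cloud", "https://upload.wikimedia.org/wikipedia/commons/5/51/Google_Cloud_logo.svg"),
   ("gcp", "https://upload.wikimedia.org/wikipedia/commons/5/51/Google_Cloud_logo.svg"),
   ("docker", "https://cdn.jsdelivr.net/gh/devicons/devicon/icons/docker/docker-original.svg"),
   ("kubernetes", "https://cdn.jsdelivr.net/gh/devicons/devicon/icons/kubernetes/kubernetes-plain.svg"),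
   ("terraform", "https://cdn.jsdelivr.net/gh/devicons/devicon/icons/terraform/terraform-original.svg"),
   ("postgres", "https://cdn.jsdelivr.net/gh/devicons/devicon/icons/postgresql/postgresql-original.svg"),
   ("mysql", "https://cdn.jsdelivr.net/gh/devicons/devicon/icons/mysql/mysql-original.svg"),
   ("mongodb", "https://cdn.jsdelivr.net/gh/devicons/devicon/icons/mongodb/mongodb-original.svg"),
   ("redis", "https://cdn.jsdelivr.net/gh/devicons/devicon/icons/redis/redis-original.svg"),
   ("nginx", "https://cdn.jsdelivr.net/gh/devicons/devicon/icons/nginx/nginx-original.svg"),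
   ("apache", "https://cdn.jsdelivr.net/gh/devicons/devicon/icons/apache/apache-original.svg")]

theorem azure_of_ms_azure (sl : String) (h : PySem.Str.isIn "microsoft azure" sl = true) :
    PySem.Str.isIn "azure" sl = true := by
  rw [PySem.Str.isIn_iff_infix] at h ⊢
  exact List.IsInfix.trans (by decide) h

theorem azure_or_ms (sl : String) :
    (PySem.Str.isIn "azure" sl || PySem.Str.isIn "microsoft azure" sl) = PySem.Str.isIn "azure" sl := by
  cases hb : PySem.Str.isIn "microsoft azure" sl with
  | false => rw [Bool.or_false]
  | true => rw [azure_of_ms_azure sl hb, Bool.true_or]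

theorem awsLoop_eq (sl : String) (l : List (String × String)) :
    awsLoop sl l = (l.find? (fun p => PySem.Str.isIn p.1 sl)).map Prod.snd := by
  induction l with
  | nil => rfl
  | cons p rest ih =>
    obtain ⟨k, u⟩ := p
    cases h : PySem.Chars.isIn k.toList sl.toList <;>
      simp [awsLoop, h, ih]

theorem logoTable_split : logoTable = aws_service_icons ++ restTable := rfl

-- A computes the first table entry whose key occurs in the lowered string
set_option maxHeartbeats 1000000 in
theorem a_eq_find (service : String) :
    get_service_logo service =
      ((logoTable.find? (fun p => PySem.Str.isIn p.1 (PySem.Str.lower service))).map Prod.snd).getD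
        defaultUrl := by
  unfold get_service_logo defaultUrl
  simp only [awsLoop_eq, azure_or_ms, logoTable_split, List.find?_append]
  cases hf : List.find? (fun p => PySem.Str.isIn p.1 (PySem.Str.lower service)) aws_service_icons with
  | some p => simp
  | none =>
    simp only [Option.map_none, Option.none_or]
    unfold restTable
    simp only [List.find?_cons, List.find?_nil]
    clear hf
    generalize PySem.Str.isIn "aws" (PySem.Str.lower service) = b1
    generalize PySem.Str.isIn "azure" (PySem.Str.lower service) = b2
    generalize PySem.Str.isIn "google cloud" (PySem.Str.lower service) = b3
    generalize PySem.Str.isIn "gcp" (PySem.Str.lower service) = b4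
    generalize PySem.Str.isIn "docker" (PySem.Str.lower service) = b5
    generalize PySem.Str.isIn "kubernetes" (PySem.Str.lower service) = b6
    generalize PySem.Str.isIn "terraform" (PySem.Str.lower service) = b7
    generalize PySem.Str.isIn "postgres" (PySem.Str.lower service) = b8
    generalize PySem.Str.isIn "mysql" (PySem.Str.lower service) = b9
    generalize PySem.Str.isIn "mongodb" (PySem.Str.lower service) = b10
    generalize PySem.Str.isIn "redis" (PySem.Str.lower service) = b11
    generalize PySem.Str.isIn "nginx" (PySem.Str.lower service) = b12
    generalize PySem.Str.isIn "apache" (PySem.Str.lower service) = b13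
    cases b1; case true => rfl
    cases b2; case true => rfl
    cases b3; case true => rfl
    cases b4; case true => rfl
    cases b5; case true => rfl
    cases b6; case true => rfl
    cases b7; case true => rfl
    cases b8; case true => rfl
    cases b9; case true => rfl
    cases b10; case true => rfl
    cases b11; case true => rfl
    cases b12; case true => rfl
    cases b13; case true => rfl
    rfl

-- innerLoop: result r is ≤ best, is best or a hit at r, and nothing in [j, r) is a hit
theorem innerLoop_spec (tail : List Char) :
    ∀ (d best j : Nat), best - j ≤ d →
      innerLoop tail best j ≤ best ∧
      (innerLoop tail best j = best ∨
        (j ≤ innerLoop tail best j ∧ innerLoop tail best j < best ∧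
          hitB tail (innerLoop tail best j) = true)) ∧
      (∀ k, j ≤ k → k < innerLoop tail best j → hitB tail k = false) := by
  intro d
  induction d with
  | zero =>
    intro best j hd
    have hnlt : ¬ j < best := by omega
    rw [innerLoop, if_neg hnlt]
    exact ⟨le_refl _, Or.inl rfl, fun k hk1 hk2 => by omega⟩
  | succ d ih =>
    intro best j hd
    by_cases hlt : j < best
    · rw [innerLoop, if_pos hlt]
      cases hh : hitB tail j with
      | true =>
        rw [if_pos rfl]
        exact ⟨by omega, Or.inr ⟨le_refl _, hlt, hh⟩, fun k hk1 hk2 => by omega⟩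
      | false =>
        rw [if_neg (by simp)]
        obtain ⟨h1, h2, h3⟩ := ih best (j + 1) (by omega)
        refine ⟨h1, ?_, ?_⟩
        · rcases h2 with h2 | ⟨ha, hb, hc⟩
          · exact Or.inl h2
          · exact Or.inr ⟨by omega, hb, hc⟩
        · intro k hk1 hk2
          rcases Nat.eq_or_lt_of_le hk1 with rfl | hk1'
          · exact hh
          · exact h3 k hk1' hk2
    · rw [innerLoop, if_neg hlt]
      exact ⟨le_refl _, Or.inl rfl, fun k hk1 hk2 => by omega⟩

-- the outer fold: result is ≤ b, is b or a hit somewhere, and nothing below it is a hit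
theorem fold_spec (sl : List Char) :
    ∀ (is : List Nat) (b : Nat),
      (is.foldl (fun best i => innerLoop (sl.drop i) best 0) b) ≤ b ∧
      ((is.foldl (fun best i => innerLoop (sl.drop i) best 0) b) = b ∨
        ∃ i ∈ is, hitB (sl.drop i) (is.foldl (fun best i => innerLoop (sl.drop i) best 0) b) = true) ∧
      (∀ k, k < (is.foldl (fun best i => innerLoop (sl.drop i) best 0) b) →
        ∀ i ∈ is, hitB (sl.drop i) k = false) := by
  intro is
  induction is with
  | nil => exact fun b => ⟨le_refl _, Or.inl rfl, fun k hk i hi => absurd hi (List.not_mem_nil)⟩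
  | cons i0 rest ih =>
    intro b
    simp only [List.foldl_cons]
    set b' := innerLoop (sl.drop i0) b 0 with hb'
    obtain ⟨s1, s2, s3⟩ := innerLoop_spec (sl.drop i0) b b 0 (by omega)
    obtain ⟨r1, r2, r3⟩ := ih b'
    refine ⟨le_trans r1 s1, ?_, ?_⟩
    · rcases r2 with r2 | ⟨i, hi, hh⟩
      · rw [r2]
        rcases s2 with s2 | ⟨_, _, hc⟩
        · exact Or.inl s2
        · exact Or.inr ⟨i0, List.mem_cons_self, hc⟩
      · exact Or.inr ⟨i, List.mem_cons_of_mem _ hi, hh⟩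
    · intro k hk i hi
      rcases List.mem_cons.mp hi with rfl | hi'
      · exact s3 k (Nat.zero_le _) (lt_of_lt_of_le hk r1)
      · exact r3 k hk i hi'

-- every pattern key in the table is a nonempty string
theorem logoTable_keys_ne_nil : ∀ p ∈ logoTable, p.1.toList ≠ [] := by decide

-- hit at (i, j) means pattern j is a prefix of the i-th suffix
theorem hitB_iff (sl : List Char) (i j : Nat) (p : String × String) (hp : logoTable[j]? = some p) :
    hitB (sl.drop i) j = true ↔ p.1.toList <+: sl.drop i := by
  unfold hitB
  rw [hp]
  exact PySem.Chars.startswith_iff _ _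

-- occurrence as a substring = a prefix hit at some position ≤ length (keys are nonempty)
theorem isIn_iff_hit (sl : List Char) (j : Nat) (p : String × String)
    (hp : logoTable[j]? = some p) :
    PySem.Chars.isIn p.1.toList sl = true ↔ ∃ i ∈ List.range (sl.length + 1), hitB (sl.drop i) j = true := by
  constructor
  · intro h
    obtain ⟨i, hi⟩ := (PySem.Chars.exists_prefix_drop_iff_isIn p.1.toList sl).mpr h
    have hne : p.1.toList ≠ [] := logoTable_keys_ne_nil p (List.mem_of_getElem? hp)
    have hile : i ≤ sl.length := by
      by_contra hgt
      have : sl.drop i = [] := List.drop_eq_nil_of_le (by omega)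
      rw [this] at hi
      exact hne (List.prefix_nil.mp hi)
    exact ⟨i, List.mem_range.mpr (by omega), (hitB_iff sl i j p hp).mpr hi⟩
  · rintro ⟨i, _, hh⟩
    exact (PySem.Chars.exists_prefix_drop_iff_isIn p.1.toList sl).mp
      ⟨i, (hitB_iff sl i j p hp).mp hh⟩

-- find? returns the entry at the least index satisfying the predicate
theorem find?_eq_of_minIdx {α : Type} (p : α → Bool) :
    ∀ (l : List α) (r : Nat) (a : α), l[r]? = some a → p a = true →
      (∀ k, k < r → ∀ b, l[k]? = some b → p b = false) → l.find? p = some a := by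
  intro l
  induction l with
  | nil => intro r a h; simp at h
  | cons x xs ih =>
    intro r a h1 h2 h3
    cases r with
    | zero =>
      simp only [List.getElem?_cons_zero, Option.some_inj] at h1
      subst h1
      simp [h2]
    | succ r' =>
      have hx : p x = false := h3 0 (Nat.succ_pos _) x (by simp)
      rw [List.find?_cons, hx]
      exact ih r' a (by simpa using h1) h2 (fun k hk b hb => h3 (k + 1) (by omega) b (by simpa using hb))

-- ===== VERDICT (by name: the statement is the Claim_ definition above) =====
theorem get_service_logo_spec : Claim_equal_get_service_logo := by
  intro service _
  unfold Spec_get_service_logo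
  rw [a_eq_find]
  unfold get_service_logo_alt
  set sl := (PySem.Str.lower service).toList with hsl
  set L := logoTable.length with hL
  set r := (List.range (sl.length + 1)).foldl (fun b start => innerLoop (sl.drop start) b 0) L with hr
  obtain ⟨f1, f2, f3⟩ := fold_spec sl (List.range (sl.length + 1)) L
  rw [← hr] at f1 f2 f3
  have hpred : ∀ q : String × String,
      PySem.Str.isIn q.1 (PySem.Str.lower service) = PySem.Chars.isIn q.1.toList sl := by
    intro q; simp [PySem.Str.isIn, hsl]
  by_cases hcase : r < L
  · -- a hit exists at index r; it is minimal
    obtain ⟨q, hq⟩ : ∃ q, logoTable[r]? = some q :=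
      ⟨_, List.getElem?_eq_getElem hcase⟩
    have hq_in : PySem.Chars.isIn q.1.toList sl = true := by
      rcases f2 with f2 | ⟨i, hi, hh⟩
      · omega
      · exact (isIn_iff_hit sl r q hq).mpr ⟨i, hi, hh⟩
    have hmin : ∀ k, k < r → ∀ b, logoTable[k]? = some b →
        (fun p => PySem.Str.isIn p.1 (PySem.Str.lower service)) b = false := by
      intro k hk b hb
      show PySem.Str.isIn b.1 (PySem.Str.lower service) = false
      rw [hpred b]
      by_contra hcontra
      have hbt : PySem.Chars.isIn b.1.toList sl = true := by
        cases h : PySem.Chars.isIn b.1.toList sl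
        · exact absurd h hcontra
        · rfl
      obtain ⟨i, hi, hh⟩ := (isIn_iff_hit sl k b hb).mp hbt
      exact absurd hh (by simp [f3 k hk i hi])
    have hfind : logoTable.find? (fun p => PySem.Str.isIn p.1 (PySem.Str.lower service)) = some q :=
      find?_eq_of_minIdx _ logoTable r q hq
        (by show PySem.Str.isIn q.1 (PySem.Str.lower service) = true; rw [hpred q]; exact hq_in) hmin
    rw [hfind]
    show (Option.map Prod.snd (some q)).getD defaultUrl =
      if r < L then ((logoTable[r]?).map Prod.snd).getD defaultUrl else defaultUrl
    rw [if_pos hcase, hq]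
  · -- no entry matches: r = L and everything below L fails
    have hrL : r = L := le_antisymm f1 (by omega)
    have hfind : logoTable.find? (fun p => PySem.Str.isIn p.1 (PySem.Str.lower service)) = none := by
      rw [List.find?_eq_none]
      intro q hqmem
      obtain ⟨k, hk, hget⟩ := List.mem_iff_getElem.mp hqmem
      have hq : logoTable[k]? = some q := by
        rw [List.getElem?_eq_getElem hk, hget]
      show ¬ PySem.Str.isIn q.1 (PySem.Str.lower service) = true
      rw [hpred q]
      intro hcontra
      obtain ⟨i, hi, hh⟩ := (isIn_iff_hit sl k q hq).mp hcontra
      have : hitB (sl.drop i) k = false := f3 k (by omega) i hi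
      simp [this] at hh
    rw [hfind]
    show (Option.map Prod.snd (none : Option (String × String))).getD defaultUrl =
      if r < L then ((logoTable[r]?).map Prod.snd).getD defaultUrl else defaultUrl
    rw [if_neg hcase]
    rfl
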